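-- pv_equiv track=rewrite | github.com/anemenman/py-puzz-cr | puzz_001_commons/pz001_chunk_slice.py | copy_pow_first_two_chunk
-- ===== SOURCE A (Python) =====
-- def copy_pow_first_two_chunk(chunks, pow_value):
--     chunks_result = chunks.copy()
--     i = 2
--     if len(chunks_result) < 2:
--         i = len(chunks_result)
--     for j in range(i):
--         chunks_result[j] = [pow(k, pow_value) for k in chunks_result[j]]
--
--     return chunks_result
-- ===== SOURCE B (Python) =====
-- def copy_pow_first_two_chunk(chunks, pow_value):
--     def go(cs, budget):
--         if budget == 0 or not cs:
--             return list(cs)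
--         head, *tail = cs
--         return [[pow(k, pow_value) for k in head]] + go(tail, budget - 1)
--     return go(chunks, 2)
-- ===== Notes on version B (the rewrite author's own statement) =====
-- stated objective: alternative
-- what changed: B replaces A's copy-then-overwrite index loop with a structural recursion on the list carrying a countdown budget of 2: each step power-maps the head and recurses on the tail, returning the remaining list unchanged when the budget is exhausted.
-- outside the precondition, e.g. on copy_pow_first_two_chunk([[2]], -1): A returns [[0.5]], B returns [[0.5]]
import Mathlib
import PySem

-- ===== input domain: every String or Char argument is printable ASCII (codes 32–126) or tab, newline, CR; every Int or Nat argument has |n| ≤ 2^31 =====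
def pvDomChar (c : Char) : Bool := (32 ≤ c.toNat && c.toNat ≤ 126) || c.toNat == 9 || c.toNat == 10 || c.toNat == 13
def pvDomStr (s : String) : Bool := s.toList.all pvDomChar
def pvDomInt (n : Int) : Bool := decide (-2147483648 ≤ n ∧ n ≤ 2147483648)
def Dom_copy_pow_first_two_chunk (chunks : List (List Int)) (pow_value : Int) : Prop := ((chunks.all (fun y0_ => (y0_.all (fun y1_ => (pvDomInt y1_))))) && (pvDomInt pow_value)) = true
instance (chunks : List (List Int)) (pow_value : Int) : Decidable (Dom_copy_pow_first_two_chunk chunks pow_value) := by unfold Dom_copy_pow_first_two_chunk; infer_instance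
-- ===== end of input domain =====

-- B replaces A's copy-then-overwrite index loop with a budgeted structural recursion on the list (alternative decomposition, same cost).

-- ===== PORT A =====
-- literal port: copy, i = min(len, 2), overwrite index j for j in range(i)
def copy_pow_first_two_chunk (chunks : List (List Int)) (pow_value : Int) : List (List Int) :=
  let chunks_result := chunks
  let i : Int := if (chunks_result.length : Int) < 2 then (chunks_result.length : Int) else 2
  (PySem.List.pyRange 0 i 1).foldl
    (fun acc j => acc.set j.toNat ((acc.getD j.toNat []).map (fun k => k ^ pow_value.toNat)))
    chunks_result

-- ===== PORT B =====
def copy_pow_first_two_chunk_go (pow_value : Int) : List (List Int) → Nat → List (List Int)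
  | cs, 0 => cs
  | [], _ => []
  | head :: tail, Nat.succ b =>
      (head.map (fun k => k ^ pow_value.toNat)) :: copy_pow_first_two_chunk_go pow_value tail b

def copy_pow_first_two_chunk_alt (chunks : List (List Int)) (pow_value : Int) : List (List Int) :=
  copy_pow_first_two_chunk_go pow_value chunks 2

-- ===== PRECONDITION & SPEC =====
-- Pre_ excludes negative exponents: there Python's pow returns a float (or raises ZeroDivisionError on base 0), leaving the declared int type.
def Pre_copy_pow_first_two_chunk (chunks : List (List Int)) (pow_value : Int) : Prop := 0 ≤ pow_value
instance (chunks : List (List Int)) (pow_value : Int) : Decidable (Pre_copy_pow_first_two_chunk chunks pow_value) := by unfold Pre_copy_pow_first_two_chunk; infer_instance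
def pvWitness_copy_pow_first_two_chunk : List (List Int) × Int := ([[2, 3], [4], [5]], 2)

def Spec_copy_pow_first_two_chunk (chunks : List (List Int)) (pow_value : Int) (out : List (List Int)) : Prop := out = copy_pow_first_two_chunk_alt chunks pow_value
instance (chunks : List (List Int)) (pow_value : Int) (out : List (List Int)) : Decidable (Spec_copy_pow_first_two_chunk chunks pow_value out) := by unfold Spec_copy_pow_first_two_chunk; infer_instance

-- ===== CLAIM (what is proved, stated in full; the proofs are below) =====
def Claim_equal_copy_pow_first_two_chunk : Prop := ∀ (chunks : List (List Int)) (pow_value : Int), Dom_copy_pow_first_two_chunk chunks pow_value → Pre_copy_pow_first_two_chunk chunks pow_value → Spec_copy_pow_first_two_chunk chunks pow_value (copy_pow_first_two_chunk chunks pow_value)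

-- ===== LEMMAS AND PROOFS =====

-- ===== VERDICT (by name: the statement is the Claim_ definition above) =====
theorem copy_pow_first_two_chunk_spec : Claim_equal_copy_pow_first_two_chunk := by
  intro chunks pow_value _dom _pre
  unfold Spec_copy_pow_first_two_chunk copy_pow_first_two_chunk copy_pow_first_two_chunk_alt
  match chunks with
  | [] => simp [PySem.List.pyRange, copy_pow_first_two_chunk_go]
  | [a] => simp [PySem.List.pyRange, copy_pow_first_two_chunk_go]
  | a :: b :: rest =>
    have h2 : ¬ ((a :: b :: rest).length : Int) < 2 := by simp
    simp only [h2, if_false]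
    have hr : PySem.List.pyRange 0 2 1 = [0, 1] := by decide
    simp [hr, copy_pow_first_two_chunk_go]
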